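-- pv_equiv track=rewrite | github.com/johnyejin/Algorithm_python | 2020-04-week1/[2020]li_3.py | solution
-- ===== SOURCE A (Python) =====
-- def solution(road, n):
--     damage = []
--
--     # 0 인 구간 찾기
--     for i in range(len(road)):
--         if road[i] == '0':
--             damage.append(i)
--
--     # 가장 긴 도로 찾기
--     try:
--         # 맨 처음꺼
--         answer = damage[n]
--         for i in range(1, len(damage) - n):
--             temp = damage[i + n] - damage[i - 1] - 1
--             if temp > answer:
--                 answer = temp
--
--         # 맨 마지막꺼
--         if len(road) - damage[-n - 1] - 1 > answer:
--             answer = len(road) - damage[-n - 1] - 1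
--     except:
--         answer = len(road)
--
--     return answer
-- ===== SOURCE B (Python) =====
-- def solution(road, n):
--     answer = 0
--     left = 0
--     zeros = 0
--     for right, c in enumerate(road):
--         if c == '0':
--             zeros += 1
--         while zeros > n:
--             if road[left] == '0':
--                 zeros -= 1
--             left += 1
--         answer = max(answer, right - left + 1)
--     return answer
-- ===== Notes on version B (the rewrite author's own statement) =====
-- stated objective: idiomatic
-- what changed: Replaces A's zero-position index table (with its try/except over damage[n], pairwise differences and a separate last-segment case) by a single two-pointer sliding window that keeps a running zero count and never builds any auxiliary list.
-- outside the precondition, e.g. on solution('000', -1): A returns 2, B raises IndexError; on solution('10101', -2): A returns 5, B raises IndexError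
import Mathlib
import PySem

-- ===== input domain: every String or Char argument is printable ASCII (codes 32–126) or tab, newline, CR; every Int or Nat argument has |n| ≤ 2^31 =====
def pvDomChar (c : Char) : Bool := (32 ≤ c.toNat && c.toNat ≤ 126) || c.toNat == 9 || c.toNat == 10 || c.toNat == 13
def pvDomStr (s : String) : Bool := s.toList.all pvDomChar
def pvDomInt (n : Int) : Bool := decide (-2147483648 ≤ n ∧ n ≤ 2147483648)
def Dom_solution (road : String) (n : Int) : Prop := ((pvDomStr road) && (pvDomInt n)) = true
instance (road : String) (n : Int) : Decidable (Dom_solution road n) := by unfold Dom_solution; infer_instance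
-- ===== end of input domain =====

-- ===== PORT A =====
-- B does not mutate its arguments; A's `damage` is local. Header: B replaces A's
-- zero-index table + try/except by a two-pointer sliding window (idiomatic rewrite).
def solution (road : String) (n : Int) : Int :=
  let cs := road.toList
  let m : Int := (cs.length : Int)
  let damage : List Int :=
    (PySem.List.pyRange 0 m 1).foldl
      (fun acc i => if PySem.List.pyGet? cs i = some '0' then acc ++ [i] else acc) []
  let body : Option Int := do
    let a0 ← PySem.List.pyGet? damage n
    let a1 ← (PySem.List.pyRange 1 ((damage.length : Int) - n) 1).foldlM
      (fun (ans : Int) i => do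
        let x ← PySem.List.pyGet? damage (i + n)
        let y ← PySem.List.pyGet? damage (i - 1)
        pure (if x - y - 1 > ans then x - y - 1 else ans)) a0
    let z ← PySem.List.pyGet? damage (-n - 1)
    pure (if m - z - 1 > a1 then m - z - 1 else a1)
  match body with
  | some a => a
  | none => m

-- ===== PORT B =====
-- the inner `while zeros > n` loop of Source B; the `none` branch is where Python B
-- would raise IndexError (unreachable under Pre_solution).
def pvAdvance (cs : List Char) (n : Int) (left : Nat) (zeros : Int) : Nat × Int :=
  if zeros > n then
    match hc : cs[left]? with
    | some c => pvAdvance cs n (left + 1) (zeros - (if c = '0' then 1 else 0))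
    | none => (left, zeros)
  else (left, zeros)
termination_by cs.length - left
decreasing_by
  have hl : left < cs.length := by
    cases Nat.lt_or_ge left cs.length with
    | inl h => exact h
    | inr h => simp [List.getElem?_eq_none_iff.mpr h] at hc
  omega

def solution_alt (road : String) (n : Int) : Int :=
  let cs := road.toList
  let st := (PySem.List.enumerate cs 0).foldl
    (fun (st : Int × Nat × Int) (p : Int × Char) =>
      let zeros := st.2.2 + (if p.2 = '0' then 1 else 0)
      let lz := pvAdvance cs n st.2.1 zeros
      (max st.1 (p.1 - (lz.1 : Int) + 1), lz.1, lz.2))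
    (0, 0, 0)
  st.1

-- ===== PRECONDITION & SPEC =====
-- Pre_ restricts to the natural domain: a nonnegative number of patches. For n < 0 A's
-- negative-index arithmetic returns accidental values and B's window raises IndexError.
def Pre_solution (road : String) (n : Int) : Prop := 0 ≤ n
instance (road : String) (n : Int) : Decidable (Pre_solution road n) := by unfold Pre_solution; infer_instance
def pvWitness_solution : String × Int := ("0110", 1)
def Spec_solution (road : String) (n : Int) (out : Int) : Prop := out = solution_alt road n
instance (road : String) (n : Int) (out : Int) : Decidable (Spec_solution road n out) := by unfold Spec_solution; infer_instance

-- ===== CLAIM (what is proved, stated in full; the proofs are below) =====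
def Claim_equal_solution : Prop := ∀ (road : String) (n : Int), Dom_solution road n → Pre_solution road n → Spec_solution road n (solution road n)

-- ===== LEMMAS AND PROOFS =====

def pvQ (cs : List Char) (j : Nat) : Bool := cs[j]? == some '0'
def pvZs (cs : List Char) : List Nat := (List.range cs.length).filter (pvQ cs)
def pvZN (cs : List Char) (a : Nat) : Nat := ((List.range a).filter (pvQ cs)).length
def pvS (cs : List Char) : Nat → Nat
  | 0 => 0
  | (t+1) => (pvZs cs).getD t 0 + 1

theorem pvZN_succ (cs : List Char) (a : Nat) :
    pvZN cs (a+1) = pvZN cs a + (if pvQ cs a then 1 else 0) := by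
  simp [pvZN, List.range_succ, List.filter_append]
  split_ifs with h <;> simp [h]

theorem pvZN_mono (cs : List Char) {a b : Nat} (h : a ≤ b) : pvZN cs a ≤ pvZN cs b := by
  induction b with
  | zero => simp_all
  | succ b ih =>
    rcases Nat.lt_or_ge a (b+1) with h' | h'
    · have := ih (by omega); rw [pvZN_succ]; split_ifs <;> omega
    · have ha : a = b + 1 := by omega
      rw [ha]

theorem pvZs_pairwise (cs : List Char) : (pvZs cs).Pairwise (· < ·) :=
  (List.pairwise_lt_range).filter _

theorem pvZs_mem_lt (cs : List Char) {x : Nat} (h : x ∈ pvZs cs) : x < cs.length := by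
  have := List.mem_of_mem_filter h
  simpa using this

theorem pvZN_eq_filter (cs : List Char) {a : Nat} (h : a ≤ cs.length) :
    pvZN cs a = ((pvZs cs).filter (fun x => decide (x < a))).length := by
  unfold pvZN pvZs
  congr 1
  rw [List.filter_comm]
  congr 1
  have : List.range cs.length = List.range a ++ (List.range (cs.length - a)).map (a + ·) := by
    rw [← List.range_add]; congr 1; omega
  rw [this, List.filter_append]
  have h1 : (List.range a).filter (fun x => decide (x < a)) = List.range a := by
    apply List.filter_eq_self.mpr; intro x hx; simp at hx ⊢; omega
  have h2 : ((List.range (cs.length - a)).map (a + ·)).filter (fun x => decide (x < a)) = [] := by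
    apply List.filter_eq_nil_iff.mpr; intro x hx; simp at hx ⊢
    obtain ⟨y, _, rfl⟩ := hx; omega
  rw [h1, h2, List.append_nil]

theorem pv_sorted_filter_lt (l : List Nat) (h : l.Pairwise (· < ·)) (t : Nat) (ht : t < l.length) :
    l.filter (fun x => decide (x < l[t])) = l.take t := by
  have hp := List.pairwise_iff_getElem.mp h
  set v := l[t] with hv
  conv_lhs => rw [← List.take_append_drop t l]
  rw [List.filter_append]
  have h1 : (l.take t).filter (fun x => decide (x < l[t])) = l.take t := by
    apply List.filter_eq_self.mpr
    intro x hx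
    obtain ⟨i, hi, hxi⟩ := List.mem_iff_getElem.mp hx
    have hi' : i < t := by simp [List.length_take] at hi; omega
    rw [List.getElem_take] at hxi
    simp [← hxi]
    exact hp i t (by omega) ht hi'
  have h2 : (l.drop t).filter (fun x => decide (x < l[t])) = [] := by
    apply List.filter_eq_nil_iff.mpr
    intro x hx
    obtain ⟨i, hi, hxi⟩ := List.mem_iff_getElem.mp hx
    rw [List.getElem_drop] at hxi
    simp [← hxi]
    have hi' : t + i < l.length := by rw [List.length_drop] at hi; omega
    rcases Nat.eq_zero_or_pos i with rfl | hpos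
    · simp
    · exact Nat.le_of_lt (hp t (t+i) (by omega) hi' (by omega))
  rw [h1, h2, List.append_nil]

theorem pv_sorted_filter_le (l : List Nat) (h : l.Pairwise (· < ·)) (t : Nat) (ht : t < l.length) :
    l.filter (fun x => decide (x < l[t] + 1)) = l.take (t+1) := by
  have hp := List.pairwise_iff_getElem.mp h
  set v := l[t] with hv
  conv_lhs => rw [← List.take_append_drop (t+1) l]
  rw [List.filter_append]
  have h1 : (l.take (t+1)).filter (fun x => decide (x < l[t] + 1)) = l.take (t+1) := by
    apply List.filter_eq_self.mpr
    intro x hx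
    obtain ⟨i, hi, hxi⟩ := List.mem_iff_getElem.mp hx
    have hi' : i < t + 1 := by simp [List.length_take] at hi; omega
    rw [List.getElem_take] at hxi
    simp [← hxi]
    rcases Nat.lt_or_ge i t with h' | h'
    · exact Nat.le_of_lt (hp i t (by omega) ht h')
    · have : i = t := by omega
      subst this; omega
  have h2 : (l.drop (t+1)).filter (fun x => decide (x < l[t] + 1)) = [] := by
    apply List.filter_eq_nil_iff.mpr
    intro x hx
    obtain ⟨i, hi, hxi⟩ := List.mem_iff_getElem.mp hx
    rw [List.getElem_drop] at hxi
    simp [← hxi]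
    have hi' : t + 1 + i < l.length := by rw [List.length_drop] at hi; omega
    exact hp t (t+1+i) (by omega) hi' (by omega)
  rw [h1, h2, List.append_nil]

theorem pvZN_zs (cs : List Char) (t : Nat) (ht : t < (pvZs cs).length) :
    pvZN cs ((pvZs cs).getD t 0) = t := by
  rw [List.getD_eq_getElem _ _ ht]
  have hlt : (pvZs cs)[t] < cs.length := pvZs_mem_lt cs (List.getElem_mem ht)
  rw [pvZN_eq_filter cs (Nat.le_of_lt hlt)]
  rw [pv_sorted_filter_lt _ (pvZs_pairwise cs) t ht]
  simp [List.length_take]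
  omega

theorem pvZN_zs_succ (cs : List Char) (t : Nat) (ht : t < (pvZs cs).length) :
    pvZN cs ((pvZs cs).getD t 0 + 1) = t + 1 := by
  rw [List.getD_eq_getElem _ _ ht]
  have hlt : (pvZs cs)[t] < cs.length := pvZs_mem_lt cs (List.getElem_mem ht)
  rw [pvZN_eq_filter cs (by omega)]
  rw [pv_sorted_filter_le _ (pvZs_pairwise cs) t ht]
  simp [List.length_take]
  omega

theorem pvZN_len (cs : List Char) : pvZN cs cs.length = (pvZs cs).length := rfl

theorem pvS_spec (cs : List Char) (t : Nat) (ht : t ≤ (pvZs cs).length) :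
    pvZN cs (pvS cs t) = t := by
  cases t with
  | zero => simp [pvS, pvZN]
  | succ t => exact pvZN_zs_succ cs t (by omega)

theorem pvZN_stable (cs : List Char) {a : Nat} (h : cs.length ≤ a) :
    pvZN cs a = (pvZs cs).length := by
  unfold pvZN pvZs
  congr 1
  have : List.range a = List.range cs.length ++ (List.range (a - cs.length)).map (cs.length + ·) := by
    rw [← List.range_add]; congr 1; omega
  rw [this, List.filter_append]
  have h2 : ((List.range (a - cs.length)).map (cs.length + ·)).filter (pvQ cs) = [] := by
    apply List.filter_eq_nil_iff.mpr
    intro x hx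
    simp at hx
    obtain ⟨y, _, rfl⟩ := hx
    simp [pvQ]
  rw [h2, List.append_nil]

theorem pvZN_le_k (cs : List Char) (a : Nat) : pvZN cs a ≤ (pvZs cs).length := by
  rcases Nat.le_total a cs.length with h' | h'
  · calc pvZN cs a ≤ pvZN cs cs.length := pvZN_mono cs h'
      _ = _ := pvZN_len cs
  · rw [pvZN_stable cs h']

theorem pvS_min (cs : List Char) (t a : Nat) (ha : t ≤ pvZN cs a) : pvS cs t ≤ a := by
  cases t with
  | zero => simp [pvS]
  | succ t =>
    by_contra hc
    rw [Nat.not_le, show pvS cs (t+1) = (pvZs cs).getD t 0 + 1 from rfl] at hc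
    have h1 : pvZN cs a ≤ pvZN cs ((pvZs cs).getD t 0) := pvZN_mono cs (by omega)
    have ht : t < (pvZs cs).length := by
      have := pvZN_le_k cs a
      omega
    have := pvZN_zs cs t ht
    omega

theorem pvS_mono (cs : List Char) {t t' : Nat} (h : t ≤ t') (h' : t' ≤ (pvZs cs).length) :
    pvS cs t ≤ pvS cs t' := by
  apply pvS_min
  rw [pvS_spec cs t' h']
  exact h

def pvE (cs : List Char) (t : Nat) : Int :=
  if t < (pvZs cs).length then ((pvZs cs).getD t 0 : Int) else (cs.length : Int)
def pvEN (cs : List Char) (t : Nat) : Nat :=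
  if t < (pvZs cs).length then (pvZs cs).getD t 0 else cs.length
def pvTerm (cs : List Char) (N j : Nat) : Int := pvE cs (j+N) - (pvS cs j : Int)
def pvG (cs : List Char) (N b : Nat) : Int := (b : Int) - (pvS cs (pvZN cs b - N) : Int)
def pvAVal (cs : List Char) (N : Nat) : Int :=
  if (pvZs cs).length ≤ N then (cs.length : Int)
  else ((List.range ((pvZs cs).length - N)).map (fun j => pvTerm cs N (j+1))).foldl max (pvTerm cs N 0)
def pvBVal (cs : List Char) (N : Nat) : Int :=
  ((List.range cs.length).map (fun i => pvG cs N (i+1))).foldl max 0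

theorem pv_foldl_max_le {l : List Int} {a c : Int} (ha : a ≤ c) (h : ∀ x ∈ l, x ≤ c) :
    l.foldl max a ≤ c := by
  induction l generalizing a with
  | nil => exact ha
  | cons x xs ih =>
    simp only [List.foldl_cons]
    exact ih (by have := h x (by simp); simp [ha, this]) (fun y hy => h y (by simp [hy]))

theorem pvE_eq (cs : List Char) (t : Nat) : pvE cs t = (pvEN cs t : Int) := by
  unfold pvE pvEN
  split_ifs <;> rfl

theorem pvEN_le (cs : List Char) (t : Nat) : pvEN cs t ≤ cs.length := by
  unfold pvEN
  split_ifs with h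
  · exact Nat.le_of_lt (pvZs_mem_lt cs (by rw [List.getD_eq_getElem _ _ h]; exact List.getElem_mem h))
  · exact le_refl _

theorem pvZN_EN (cs : List Char) (N j : Nat) (_hj : j + N ≤ (pvZs cs).length) (_hN : N < (pvZs cs).length) :
    pvZN cs (pvEN cs (j + N)) = if j + N < (pvZs cs).length then j + N else (pvZs cs).length := by
  unfold pvEN
  split_ifs with h
  · exact pvZN_zs cs _ h
  · rw [pvZN_len]

theorem pv_term_eq_g (cs : List Char) (N j : Nat) (_hj : j ≤ (pvZs cs).length - N) (hN : N < (pvZs cs).length) :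
    pvTerm cs N j = pvG cs N (pvEN cs (j + N)) := by
  unfold pvTerm pvG
  rw [pvE_eq]
  have hz := pvZN_EN cs N j (by omega) hN
  congr 3
  split_ifs at hz <;> omega

theorem pv_g_le_term (cs : List Char) (N b : Nat) (hb : b ≤ cs.length) :
    pvG cs N b ≤ pvTerm cs N (pvZN cs b - N) := by
  unfold pvG pvTerm
  rw [pvE_eq]
  have hle : b ≤ pvEN cs (pvZN cs b - N + N) := by
    unfold pvEN
    split_ifs with h
    · by_contra hc
      rw [Nat.not_le] at hc
      have h1 : pvZN cs ((pvZs cs).getD (pvZN cs b - N + N) 0 + 1) ≤ pvZN cs b := pvZN_mono cs (by omega)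
      have h2 := pvZN_zs_succ cs _ h
      omega
    · exact hb
  omega

theorem pvAB (cs : List Char) (N : Nat) : pvAVal cs N = pvBVal cs N := by
  unfold pvAVal
  split_ifs with hk
  · apply le_antisymm
    · cases hm : cs.length with
      | zero => unfold pvBVal; simp [hm]
      | succ m' =>
        have hmem : pvG cs N cs.length ∈ (List.range cs.length).map (fun i => pvG cs N (i+1)) := by
          rw [List.mem_map]
          exact ⟨m', by simp [hm], by rw [← hm]⟩
        have := (PySem.List.le_foldl_max ((List.range cs.length).map (fun i => pvG cs N (i+1))) 0).2 _ hmem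
        unfold pvBVal
        have hg : pvG cs N cs.length = (cs.length : Int) := by
          unfold pvG
          rw [pvZN_len, Nat.sub_eq_zero_of_le hk]
          simp [pvS]
        omega
    · apply pv_foldl_max_le (by positivity)
      intro x hx
      rw [List.mem_map] at hx
      obtain ⟨i, hi, rfl⟩ := hx
      rw [List.mem_range] at hi
      unfold pvG
      have : (0:Int) ≤ (pvS cs (pvZN cs (i+1) - N) : Int) := by positivity
      omega
  · rw [Nat.not_le] at hk
    apply le_antisymm
    · have key : ∀ j, j ≤ (pvZs cs).length - N → pvTerm cs N j ≤ pvBVal cs N := by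
        intro j hj
        rw [pv_term_eq_g cs N j hj hk]
        set b := pvEN cs (j + N) with hbdef
        cases hb : b with
        | zero =>
          have h0 : (0:Int) ≤ pvBVal cs N := (PySem.List.le_foldl_max _ 0).1
          unfold pvG
          have hS : (0:Int) ≤ (pvS cs (pvZN cs 0 - N) : Int) := by positivity
          push_cast
          omega
        | succ b' =>
          have hbm : b ≤ cs.length := pvEN_le cs (j+N)
          have hmem : pvG cs N (b'+1) ∈ (List.range cs.length).map (fun i => pvG cs N (i+1)) := by
            rw [List.mem_map]
            exact ⟨b', by rw [List.mem_range]; omega, rfl⟩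
          exact (PySem.List.le_foldl_max _ 0).2 _ hmem
      apply pv_foldl_max_le (key 0 (by omega))
      intro x hx
      rw [List.mem_map] at hx
      obtain ⟨j, hjr, rfl⟩ := hx
      rw [List.mem_range] at hjr
      exact key (j+1) (by omega)
    · have hA0 : pvTerm cs N 0 ≤ ((List.range ((pvZs cs).length - N)).map (fun j => pvTerm cs N (j+1))).foldl max (pvTerm cs N 0) :=
        (PySem.List.le_foldl_max _ _).1
      have h00 : (0:Int) ≤ pvTerm cs N 0 := by
        unfold pvTerm pvS
        rw [pvE_eq]
        simp
      apply pv_foldl_max_le (by omega)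
      intro x hx
      rw [List.mem_map] at hx
      obtain ⟨i, hi, rfl⟩ := hx
      rw [List.mem_range] at hi
      have hgt := pv_g_le_term cs N (i+1) (by omega)
      set j := pvZN cs (i+1) - N with hjdef
      have hjle : j ≤ (pvZs cs).length - N := by
        have := pvZN_le_k cs (i+1)
        omega
      have : pvTerm cs N j ≤ ((List.range ((pvZs cs).length - N)).map (fun j => pvTerm cs N (j+1))).foldl max (pvTerm cs N 0) := by
        rcases Nat.eq_zero_or_pos j with hj0 | hj0
        · rw [hj0]; exact hA0
        · apply (PySem.List.le_foldl_max _ _).2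
          rw [List.mem_map]
          exact ⟨j-1, by rw [List.mem_range]; omega, by congr 1; omega⟩
      omega
theorem pvQ_iff (cs : List Char) (l : Nat) (hl : l < cs.length) :
    (pvQ cs l = true) ↔ cs[l] = '0' := by
  simp [pvQ, List.getElem?_eq_getElem hl]

theorem pvAdvance_spec (cs : List Char) (N b : Nat) :
    ∀ (l : Nat), l ≤ pvS cs (pvZN cs b - N) →
    pvAdvance cs (N : Int) l ((pvZN cs b : Int) - (pvZN cs l : Int)) =
      (pvS cs (pvZN cs b - N), (pvZN cs b : Int) - (pvZN cs (pvS cs (pvZN cs b - N)) : Int)) := by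
  intro l
  induction hd : cs.length - l using Nat.strong_induction_on generalizing l with
  | _ d ih =>
    intro hl
    rw [pvAdvance]
    split_ifs with hgt
    · have hZlt : pvZN cs l + N < pvZN cs b := by omega
      have hlm : l < cs.length := by
        by_contra hc
        rw [Nat.not_lt] at hc
        have h1 := pvZN_stable cs hc
        have h2 := pvZN_le_k cs b
        omega
      have hget : cs[l]? = some cs[l] := List.getElem?_eq_getElem hlm
      have hsub : pvZN cs b - N ≤ (pvZs cs).length := by
        have := pvZN_le_k cs b
        omega
      have hstep : ((pvZN cs b : Int) - (pvZN cs l : Int)) - (if cs[l] = '0' then 1 else 0)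
          = (pvZN cs b : Int) - (pvZN cs (l+1) : Int) := by
        rw [pvZN_succ cs l]
        by_cases hq : pvQ cs l = true
        · rw [if_pos ((pvQ_iff cs l hlm).mp hq), if_pos hq]
          push_cast
          omega
        · rw [if_neg (fun hc => hq ((pvQ_iff cs l hlm).mpr hc)), if_neg hq]
          push_cast
          omega
      have hl1 : l + 1 ≤ pvS cs (pvZN cs b - N) := by
        rcases Nat.lt_or_ge l (pvS cs (pvZN cs b - N)) with h' | h'
        · omega
        · exfalso
          have h1 : pvZN cs (pvS cs (pvZN cs b - N)) ≤ pvZN cs l := pvZN_mono cs h'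
          have h2 := pvS_spec cs (pvZN cs b - N) hsub
          omega
      split
      next c hc =>
        rw [hget] at hc
        injection hc with hc'
        subst hc'
        rw [hstep]
        exact ih (cs.length - (l+1)) (by omega) (l+1) rfl hl1
      next hc =>
        rw [hget] at hc
        exact absurd hc (by simp)
    · have h1 : pvS cs (pvZN cs b - N) ≤ l := pvS_min cs _ l (by omega)
      have hleq : l = pvS cs (pvZN cs b - N) := by omega
      rw [← hleq]

theorem pvLoop (cs : List Char) (N : Nat) :
    ∀ (d i : Nat), i + d = cs.length →
    ∀ (ans : Int),
    ((PySem.List.enumerate (cs.drop i) (i : Int)).foldl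
      (fun (st : Int × Nat × Int) (p : Int × Char) =>
        (max st.1 (p.1 - ((pvAdvance cs (N : Int) st.2.1 (st.2.2 + (if p.2 = '0' then 1 else 0))).1 : Int) + 1),
         (pvAdvance cs (N : Int) st.2.1 (st.2.2 + (if p.2 = '0' then 1 else 0))).1,
         (pvAdvance cs (N : Int) st.2.1 (st.2.2 + (if p.2 = '0' then 1 else 0))).2))
      (ans, pvS cs (pvZN cs i - N), (pvZN cs i : Int) - (pvZN cs (pvS cs (pvZN cs i - N)) : Int))).1
    = ((List.range d).map (fun t => pvG cs N (i+1+t))).foldl max ans := by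
  intro d
  induction d with
  | zero =>
    intro i hi ans
    rw [List.drop_of_length_le (by omega), PySem.List.enumerate_nil]
    simp
  | succ d ih =>
    intro i hi ans
    have him : i < cs.length := by omega
    rw [List.drop_eq_getElem_cons him, PySem.List.enumerate_cons, List.foldl_cons]
    dsimp only
    have hz : ((pvZN cs i : Int) - (pvZN cs (pvS cs (pvZN cs i - N)) : Int)) + (if cs[i] = '0' then 1 else 0)
        = (pvZN cs (i+1) : Int) - (pvZN cs (pvS cs (pvZN cs i - N)) : Int) := by
      rw [pvZN_succ cs i]
      by_cases hq : pvQ cs i = true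
      · rw [if_pos ((pvQ_iff cs i him).mp hq), if_pos hq]; push_cast; omega
      · rw [if_neg (fun hc => hq ((pvQ_iff cs i him).mpr hc)), if_neg hq]; push_cast; omega
    have hsub1 : pvZN cs (i+1) - N ≤ (pvZs cs).length := by
      have := pvZN_le_k cs (i+1); omega
    have hlmono : pvS cs (pvZN cs i - N) ≤ pvS cs (pvZN cs (i+1) - N) := by
      apply pvS_mono cs _ hsub1
      have h1 : pvZN cs i ≤ pvZN cs (i+1) := pvZN_mono cs (by omega)
      omega
    have hadv := pvAdvance_spec cs N (i+1) (pvS cs (pvZN cs i - N)) hlmono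
    rw [hz, hadv]
    dsimp only
    have hg : max ans ((i : Int) - (pvS cs (pvZN cs (i+1) - N) : Int) + 1) = max ans (pvG cs N (i+1)) := by
      unfold pvG; congr 1; push_cast; omega
    rw [hg]
    have hcast : ((i : Int) + 1) = ((i+1 : Nat) : Int) := by push_cast; omega
    rw [hcast]
    rw [ih (i+1) (by omega) (max ans (pvG cs N (i+1)))]
    rw [List.range_succ_eq_map, List.map_cons, List.map_map, List.foldl_cons]
    have h1 : i + 1 + 0 = i + 1 := by omega
    rw [h1]
    congr 1
    apply List.map_congr_left
    intro t _
    simp only [Function.comp_apply]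
    congr 1
    omega

theorem pvB_char (road : String) (N : Nat) : solution_alt road (N : Int) = pvBVal road.toList N := by
  unfold solution_alt
  dsimp only
  rw [show PySem.List.enumerate road.toList 0
      = PySem.List.enumerate (road.toList.drop 0) (((0:Nat)) : Int) by norm_num]
  have hZ0 : pvZN road.toList 0 = 0 := rfl
  have hinit : ((0:Int), (0:Nat), (0:Int))
      = ((0:Int), pvS road.toList (pvZN road.toList 0 - N),
         (pvZN road.toList 0 : Int) - (pvZN road.toList (pvS road.toList (pvZN road.toList 0 - N)) : Int)) := by
    rw [hZ0]; simp [pvS]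
  rw [hinit, pvLoop road.toList N road.toList.length 0 (by omega) 0]
  unfold pvBVal
  congr 1
  apply List.map_congr_left
  intro t _
  congr 1
  omega

theorem pv_if_max (a b : Int) : (if b > a then b else a) = max a b := by
  rw [max_def]; split_ifs <;> omega

theorem pv_build (cs : List Char) :
    ∀ (l : List Nat) (acc : List Int),
    (l.map (fun j : Nat => (j : Int))).foldl
      (fun acc i => if PySem.List.pyGet? cs i = some '0' then acc ++ [i] else acc) acc
    = acc ++ ((l.filter (pvQ cs)).map (fun j : Nat => (j : Int))) := by
  intro l
  induction l with
  | nil => simp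
  | cons x xs ih =>
    intro acc
    simp only [List.map_cons, List.foldl_cons, List.filter_cons]
    rw [PySem.List.pyGet?_natCast]
    by_cases h : pvQ cs x = true
    · rw [if_pos (by simpa [pvQ] using h), if_pos h]
      rw [ih]
      simp
    · rw [if_neg (by simp [pvQ] at h; simp [h]), if_neg h]
      rw [ih]

theorem pvA_loop (cs : List Char) (N : Nat) :
    ∀ (l : List Nat) (acc : Int), (∀ t ∈ l, t + 1 + N < (pvZs cs).length) →
    ((l.map (fun t : Nat => (1:Int) + (t:Int))).foldlM
      (fun (ans : Int) i =>
        Option.bind (PySem.List.pyGet? ((pvZs cs).map (fun j : Nat => (j : Int))) (i + (N:Int)))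
          (fun x => Option.bind (PySem.List.pyGet? ((pvZs cs).map (fun j : Nat => (j : Int))) (i - 1))
            (fun y => some (if x - y - 1 > ans then x - y - 1 else ans)))) acc)
    = some (l.foldl
        (fun ans t => max ans (((pvZs cs).getD (t+1+N) 0 : Int) - ((pvZs cs).getD t 0 : Int) - 1)) acc) := by
  intro l
  induction l with
  | nil => intro acc _; simp
  | cons t ts ih =>
    intro acc hmem
    have htk : t + 1 + N < (pvZs cs).length := hmem t (by simp)
    rw [List.map_cons, List.foldlM_cons]
    have h1 : (1:Int) + (t:Int) + (N:Int) = ((t+1+N : Nat) : Int) := by push_cast; omega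
    have h2 : (1:Int) + (t:Int) - 1 = ((t : Nat) : Int) := by omega
    rw [h1, h2, PySem.List.pyGet?_natCast, PySem.List.pyGet?_natCast]
    have hx : ((pvZs cs).map (fun j : Nat => (j : Int)))[t+1+N]? = some ((pvZs cs).getD (t+1+N) 0 : Int) := by
      rw [List.getElem?_map, List.getElem?_eq_getElem htk, List.getD_eq_getElem _ _ htk]
      rfl
    have hy : ((pvZs cs).map (fun j : Nat => (j : Int)))[t]? = some ((pvZs cs).getD t 0 : Int) := by
      have htl : t < (pvZs cs).length := by omega
      rw [List.getElem?_map, List.getElem?_eq_getElem htl, List.getD_eq_getElem _ _ htl]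
      rfl
    rw [hx, hy, Option.bind_some, Option.bind_some]
    simp only [Option.bind_eq_bind, Option.bind_some]
    rw [pv_if_max, List.foldl_cons]
    exact ih _ (fun x hxm => hmem x (by simp [hxm]))

theorem pvA_char (road : String) (N : Nat) : solution road (N : Int) = pvAVal road.toList N := by
  unfold solution
  dsimp only
  rw [PySem.List.pyRange_zero_nat]
  rw [pv_build road.toList (List.range road.toList.length) []]
  rw [List.nil_append]
  show (match (do
      let a0 ← PySem.List.pyGet? ((pvZs road.toList).map (fun j : Nat => (j : Int))) (N : Int)
      let a1 ← (PySem.List.pyRange 1 ((((pvZs road.toList).map (fun j : Nat => (j : Int))).length : Int) - (N:Int)) 1).foldlM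
        (fun (ans : Int) i => do
          let x ← PySem.List.pyGet? ((pvZs road.toList).map (fun j : Nat => (j : Int))) (i + (N:Int))
          let y ← PySem.List.pyGet? ((pvZs road.toList).map (fun j : Nat => (j : Int))) (i - 1)
          pure (if x - y - 1 > ans then x - y - 1 else ans)) a0
      let z ← PySem.List.pyGet? ((pvZs road.toList).map (fun j : Nat => (j : Int))) (-(N:Int) - 1)
      pure (if (road.toList.length : Int) - z - 1 > a1 then (road.toList.length : Int) - z - 1 else a1)) with
    | some a => a
    | none => ((road.toList.length : Int))) = pvAVal road.toList N
  simp only [Option.bind_eq_bind, Option.pure_def]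
  by_cases hNk : (pvZs road.toList).length ≤ N
  · -- damage[n] raises IndexError; A returns len(road)
    rw [PySem.List.pyGet?_natCast]
    rw [List.getElem?_eq_none (by rw [List.length_map]; omega)]
    unfold pvAVal
    rw [if_pos hNk]
    rfl
  · rw [Nat.not_le] at hNk
    rw [PySem.List.pyGet?_natCast]
    have hx0 : ((pvZs road.toList).map (fun j : Nat => (j : Int)))[N]?
        = some (((pvZs road.toList).getD N 0 : Nat) : Int) := by
      rw [List.getElem?_map, List.getElem?_eq_getElem hNk, List.getD_eq_getElem _ _ hNk]
      rfl
    rw [hx0, Option.bind_some]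
    rw [show ((((pvZs road.toList).map (fun j : Nat => (j : Int))).length : Int) - (N:Int))
        = (((pvZs road.toList).length : Nat) : Int) - (N:Int) by rw [List.length_map]]
    rw [PySem.List.pyRange_one 1 ((((pvZs road.toList).length : Nat) : Int) - (N:Int))]
    rw [show (((((pvZs road.toList).length : Nat) : Int) - (N:Int)) - 1).toNat
        = (pvZs road.toList).length - N - 1 by omega]
    rw [pvA_loop road.toList N (List.range ((pvZs road.toList).length - N - 1)) _
        (fun t ht => by rw [List.mem_range] at ht; omega), Option.bind_some]
    rw [show (-(N:Int) - 1) = -(((N+1 : Nat)) : Int) by push_cast; ring]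
    rw [PySem.List.pyGet?_neg_natCast _ (N+1) (by omega) (by rw [List.length_map]; omega)]
    rw [List.length_map]
    have hlast : ((pvZs road.toList).map (fun j : Nat => (j : Int)))[(pvZs road.toList).length - (N+1)]?
        = some (((pvZs road.toList).getD ((pvZs road.toList).length - N - 1) 0 : Nat) : Int) := by
      have hidx : (pvZs road.toList).length - (N+1) = (pvZs road.toList).length - N - 1 := by omega
      have hlt : (pvZs road.toList).length - N - 1 < (pvZs road.toList).length := by omega
      rw [hidx, List.getElem?_map, List.getElem?_eq_getElem hlt, List.getD_eq_getElem _ _ hlt]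
      rfl
    rw [hlast, Option.bind_some]
    rw [pv_if_max]
    -- now both sides are closed max expressions
    unfold pvAVal
    rw [if_neg (by omega)]
    rw [show (pvZs road.toList).length - N = ((pvZs road.toList).length - N - 1) + 1 by omega]
    rw [List.range_succ, List.map_append, List.foldl_append]
    simp only [List.map_cons, List.map_nil, List.foldl_cons, List.foldl_nil]
    have ht0 : pvTerm road.toList N 0 = (((pvZs road.toList).getD N 0 : Nat) : Int) := by
      unfold pvTerm pvE pvS
      rw [if_pos (by omega : 0 + N < (pvZs road.toList).length)]
      simp
    have htlast : pvTerm road.toList N (((pvZs road.toList).length - N - 1) + 1)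
        = (road.toList.length : Int) - (((pvZs road.toList).getD ((pvZs road.toList).length - N - 1) 0 : Nat) : Int) - 1 := by
      unfold pvTerm pvE pvS
      rw [if_neg (by omega)]
      push_cast
      ring
    rw [htlast, List.foldl_map, ht0]
    simp only [Nat.add_sub_cancel]
    have hfold := PySem.List.foldl_congr_mem (List.range ((pvZs road.toList).length - N - 1))
      (fun ans t => max ans ((((pvZs road.toList).getD (t+1+N) 0 : Nat) : Int) - (((pvZs road.toList).getD t 0 : Nat) : Int) - 1))
      (fun x y => max x (pvTerm road.toList N (y+1)))
      ((((pvZs road.toList).getD N 0 : Nat)) : Int)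
      (by
        intro acc t ht
        rw [List.mem_range] at ht
        show max acc ((((pvZs road.toList).getD (t+1+N) 0 : Nat) : Int) - (((pvZs road.toList).getD t 0 : Nat) : Int) - 1)
            = max acc (pvTerm road.toList N (t+1))
        congr 1
        unfold pvTerm pvE pvS
        rw [if_pos (by omega)]
        push_cast
        ring)
    exact congrArg (fun z => max z ((road.toList.length : Int) - (((pvZs road.toList).getD ((pvZs road.toList).length - N - 1) 0 : Nat) : Int) - 1)) hfold

-- ===== VERDICT (by name: the statement is the Claim_ definition above) =====
theorem solution_spec : Claim_equal_solution := by
  intro road n _ hpre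
  obtain ⟨N, rfl⟩ := Int.eq_ofNat_of_zero_le hpre
  unfold Spec_solution
  rw [pvA_char, pvB_char, pvAB]
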